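-- pv_equiv track=rewrite | github.com/Sysmic-Robotics/testing-python | integracionSerial.py | entero_a_binario
-- ===== SOURCE A (Python) =====
-- def entero_a_binario(n, longitud):
--     if n == 0:
--         return '0' * longitud
--     signo = '0' if n >= 0 else '1'
--     n = abs(n)
--     binario = ''
--     while n > 0:
--         binario = str(n % 2) + binario
--         n //= 2
--     return signo + (binario).zfill(longitud - 1)
-- ===== SOURCE B (Python) =====
-- def entero_a_binario(n, longitud):
--     if n == 0:
--         return '0' * longitud
--     signo = '0' if n >= 0 else '1'
--     m = abs(n)
--     digits = ''
--     for i in range(m.bit_length() - 1, -1, -1):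
--         digits += str((m >> i) & 1)
--     return signo + '0' * (longitud - 1 - len(digits)) + digits
-- ===== Notes on version B (the rewrite author's own statement) =====
-- stated objective: alternative
-- what changed: Replaces the LSB-first while loop that repeatedly prepends n%2 and halves n with an MSB-first pass over bit positions bit_length()-1..0 extracting each bit by shift-and-mask, and replaces zfill with explicit left padding computed from the digit count.
import Mathlib
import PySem

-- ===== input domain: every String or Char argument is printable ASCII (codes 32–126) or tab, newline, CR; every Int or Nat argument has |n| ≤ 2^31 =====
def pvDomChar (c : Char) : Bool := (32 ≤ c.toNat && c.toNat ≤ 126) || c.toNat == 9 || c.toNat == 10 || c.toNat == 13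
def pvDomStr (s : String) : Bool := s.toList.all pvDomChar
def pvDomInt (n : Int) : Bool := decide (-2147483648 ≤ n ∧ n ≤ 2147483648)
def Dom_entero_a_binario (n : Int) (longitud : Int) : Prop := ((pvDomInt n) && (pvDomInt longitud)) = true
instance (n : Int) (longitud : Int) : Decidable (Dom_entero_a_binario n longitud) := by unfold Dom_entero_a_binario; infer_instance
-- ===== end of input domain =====

-- B replaces A's LSB-first while loop (prepend n%2, halve n) by an MSB-first pass over the
-- bit positions bit_length()-1 .. 0 and explicit left padding instead of zfill; objective: alternative.

-- ===== PORT A =====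
-- the `while n > 0` loop: binario = str(n % 2) + binario; n //= 2
def pvLoopA (m : Nat) (binario : String) : String :=
  if m > 0 then pvLoopA (m / 2) (PySem.Int.toStr ((m % 2 : Nat) : Int) ++ binario) else binario
termination_by m
decreasing_by exact Nat.div_lt_self (by omega) (by omega)

def entero_a_binario (n : Int) (longitud : Int) : String :=
  if n = 0 then String.ofList (PySem.List.pyRepeat ['0'] longitud)   -- '0' * longitud
  else
    let signo := if n ≥ 0 then "0" else "1"
    let binario := pvLoopA n.natAbs ""                           -- n = abs(n); while loop
    signo ++ PySem.Str.zfill binario (longitud - 1)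

-- ===== PORT B =====
-- the `for i in range(m.bit_length() - 1, -1, -1)` loop appending str((m >> i) & 1);
-- range(bl-1, -1, -1) is exactly [bl-1, …, 0] = (List.range bl).reverse
def entero_a_binario_alt (n : Int) (longitud : Int) : String :=
  if n = 0 then String.ofList (PySem.List.pyRepeat ['0'] longitud)   -- '0' * longitud
  else
    let signo := if n ≥ 0 then "0" else "1"
    let m := n.natAbs                                            -- m = abs(n)
    let digits := (List.range (PySem.Int.bitLength (m : Int))).reverse.foldl
        (fun acc i => acc ++ PySem.Int.toStr (((m >>> i) &&& 1 : Nat) : Int)) ""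
    signo ++ String.ofList (PySem.List.pyRepeat ['0'] (longitud - 1 - (digits.toList.length : Int))) ++ digits

-- ===== PRECONDITION & SPEC =====
def Spec_entero_a_binario (n : Int) (longitud : Int) (out : String) : Prop := out = entero_a_binario_alt n longitud
instance (n : Int) (longitud : Int) (out : String) : Decidable (Spec_entero_a_binario n longitud out) := by unfold Spec_entero_a_binario; infer_instance

-- ===== CLAIM (what is proved, stated in full; the proofs are below) =====
def Claim_equal_entero_a_binario : Prop := ∀ (n : Int) (longitud : Int), Dom_entero_a_binario n longitud → Spec_entero_a_binario n longitud (entero_a_binario n longitud)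

-- ===== LEMMAS AND PROOFS =====

-- reference: the plain binary digit list of m (empty for 0), LSB recursion
def pvRefBits (m : Nat) : List Char :=
  if m = 0 then [] else pvRefBits (m / 2) ++ [if m % 2 = 1 then '1' else '0']
termination_by m
decreasing_by exact Nat.div_lt_self (by omega) (by omega)

theorem pvToStr_bit (m : Nat) :
    PySem.Int.toChars ((m : Int) % 2) = [if m % 2 = 1 then '1' else '0'] := by
  have h2 : ((m : Int) % 2) = ((m % 2 : Nat) : Int) := by push_cast; ring
  rw [h2]
  rcases Nat.mod_two_eq_zero_or_one m with h | h <;> rw [h] <;> decide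

theorem pvRefBits_digits (m : Nat) : ∀ c ∈ pvRefBits m, c = '0' ∨ c = '1' := by
  induction m using Nat.strong_induction_on with
  | _ m ih =>
    rw [pvRefBits]
    split
    · simp
    · intro c hc
      rcases List.mem_append.mp hc with h | h
      · exact ih (m / 2) (Nat.div_lt_self (by omega) (by omega)) c h
      · simp only [List.mem_singleton] at h
        subst h; split <;> simp

theorem pvRefBits_ne_nil (m : Nat) (hm : 0 < m) : pvRefBits m ≠ [] := by
  rw [pvRefBits]
  simp [Nat.pos_iff_ne_zero.mp hm]

theorem pvLoopA_eq (m : Nat) : ∀ acc : String, (pvLoopA m acc).toList = pvRefBits m ++ acc.toList := by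
  induction m using Nat.strong_induction_on with
  | _ m ih =>
    intro acc
    rw [pvLoopA, pvRefBits]
    by_cases h : m = 0
    · simp [h]
    · simp only [h, Nat.pos_of_ne_zero h, if_pos, ite_false]
      rw [ih (m / 2) (Nat.div_lt_self (by omega) (by omega))]
      simp [pvToStr_bit]

-- a foldl appending strings is the concatenation of their character lists
theorem pvFoldl_append (f : Nat → String) (l : List Nat) : ∀ init : String,
    (l.foldl (fun acc i => acc ++ f i) init).toList
      = init.toList ++ l.flatMap (fun i => (f i).toList) := by
  induction l with
  | nil => simp
  | cons x xs ih => intro init; simp [ih, String.toList_append]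

-- peel position 0 off the MSB-first traversal
theorem pvFlatMap_singleton (l : List Nat) (f : Nat → Char) :
    l.flatMap (fun i => [f i]) = l.map f := by
  induction l <;> simp [*]

theorem pvRange_step (k : Nat) (g : Nat → Char) :
    (List.range (k + 1)).reverse.flatMap (fun i => [g i])
      = (List.range k).reverse.flatMap (fun i => [g (i + 1)]) ++ [g 0] := by
  rw [pvFlatMap_singleton, pvFlatMap_singleton, List.range_succ_eq_map]
  simp [List.reverse_cons, List.map_append, ← List.map_reverse, List.map_map,
    Function.comp_def, Nat.succ_eq_add_one]

theorem pvMSB_eq (m : Nat) (hm : 0 < m) :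
    (List.range (PySem.Int.bitLength (m : Int))).reverse.flatMap
        (fun i => [if m / 2 ^ i % 2 = 1 then '1' else '0']) = pvRefBits m := by
  induction m using Nat.strong_induction_on with
  | _ m ih =>
    rw [PySem.Int.bitLength_natCast hm,
        pvRange_step _ (fun i => if m / 2 ^ i % 2 = 1 then '1' else '0')]
    have hdiv : ∀ i : Nat, m / 2 ^ (i + 1) = (m / 2) / 2 ^ i := by
      intro i; rw [pow_succ, mul_comm, Nat.div_div_eq_div_mul, mul_comm]
    simp only [hdiv, pow_zero, Nat.div_one]
    rw [pvRefBits, if_neg (Nat.pos_iff_ne_zero.mp hm)]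
    congr 1
    by_cases h2 : m / 2 = 0
    · rw [h2]
      rw [pvRefBits]
      norm_num [PySem.Int.bitLength_zero]
    · exact ih (m / 2) (Nat.div_lt_self (by omega) (by omega)) (Nat.pos_of_ne_zero h2)

-- zfill on a pure digit string is plain left padding
theorem pvZfill_digits (cs : List Char) (w : Int)
    (h : ∀ c ∈ cs, c = '0' ∨ c = '1') (hne : cs ≠ []) :
    PySem.Chars.zfill cs w = List.replicate (w - cs.length).toNat '0' ++ cs := by
  cases cs with
  | nil => exact absurd rfl hne
  | cons c rest =>
    have hc : ¬ (c = '+' ∨ c = '-') := by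
      rcases h c List.mem_cons_self with h0 | h0 <;> subst h0 <;> decide
    simp only [PySem.Chars.zfill, hc, ite_false]
    split_ifs with hw
    · have hz : (w - ((c :: rest).length : Int)).toNat = 0 := by
        simp only [List.length_cons] at hw ⊢; omega
      rw [hz]; simp
    · have heq : w.toNat - (c :: rest).length = (w - ((c :: rest).length : Int)).toNat := by
        simp only [List.length_cons] at hw ⊢; omega
      rw [heq]

-- B's digit string has the same characters as A's
theorem pvDigits_eq (m : Nat) (hm : 0 < m) :
    ((List.range (PySem.Int.bitLength (m : Int))).reverse.foldl
        (fun acc i => acc ++ PySem.Int.toStr (((m >>> i) &&& 1 : Nat) : Int)) "").toList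
      = pvRefBits m := by
  rw [pvFoldl_append]
  have hbit : ∀ i : Nat, (PySem.Int.toStr (((m >>> i) &&& 1 : Nat) : Int)).toList
      = [if m / 2 ^ i % 2 = 1 then '1' else '0'] := by
    intro i
    rw [PySem.Int.toList_toStr, Nat.shiftRight_eq_div_pow, Nat.and_one_is_mod]
    have : (((m / 2 ^ i % 2 : Nat)) : Int) = ((m / 2 ^ i : Nat) : Int) % 2 := by push_cast; ring
    rw [this, pvToStr_bit]
  simp only [hbit]
  simpa using pvMSB_eq m hm

-- ===== VERDICT (by name: the statement is the Claim_ definition above) =====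
theorem entero_a_binario_spec : Claim_equal_entero_a_binario := by
  intro n longitud _
  unfold Spec_entero_a_binario entero_a_binario entero_a_binario_alt
  by_cases h0 : n = 0
  · simp [h0]
  · simp only [h0, ite_false]
    have hm : 0 < n.natAbs := Int.natAbs_pos.mpr h0
    have hl : (pvLoopA n.natAbs "").toList = pvRefBits n.natAbs := by
      simpa using pvLoopA_eq n.natAbs ""
    apply String.toList_inj.mp
    simp only [String.toList_append, PySem.Str.toList_zfill, String.toList_ofList,
      pvDigits_eq n.natAbs hm, hl,
      pvZfill_digits (pvRefBits n.natAbs) (longitud - 1) (pvRefBits_digits _) (pvRefBits_ne_nil _ hm),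
      PySem.List.pyRepeat_singleton, List.append_assoc]
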